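-- pv_equiv track=rewrite | github.com/lucaxgomex/ifpi-ads | CRUD/crud-01/string/funcao3.py | has_no_letter
-- ===== SOURCE A (Python) =====
-- def has_no_letter(word, array):
--     for i in word:
--         for j in array:
--             if i == j:
--                 return False
--                 """
--                 Caso as letras proibidas estejam contidas na palavras,
--                 o valor de retorno sera falso
--
--                 O valor de retorno verdadeiro ira funcionar
--                 como um filtro que seleciona somente as palavras
--                 que nao apresentam as letras proibidas
--                 """
--     return True
-- ===== SOURCE B (Python) =====
-- def has_no_letter(word, array):
--     return not (set(word) & set(array))
-- ===== Notes on version B (the rewrite author's own statement) =====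
-- stated objective: faster
-- what changed: Replaces the nested char-by-element double loop with early return by materialising both collections as hash sets and testing their intersection for emptiness in one expression.
import Mathlib
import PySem

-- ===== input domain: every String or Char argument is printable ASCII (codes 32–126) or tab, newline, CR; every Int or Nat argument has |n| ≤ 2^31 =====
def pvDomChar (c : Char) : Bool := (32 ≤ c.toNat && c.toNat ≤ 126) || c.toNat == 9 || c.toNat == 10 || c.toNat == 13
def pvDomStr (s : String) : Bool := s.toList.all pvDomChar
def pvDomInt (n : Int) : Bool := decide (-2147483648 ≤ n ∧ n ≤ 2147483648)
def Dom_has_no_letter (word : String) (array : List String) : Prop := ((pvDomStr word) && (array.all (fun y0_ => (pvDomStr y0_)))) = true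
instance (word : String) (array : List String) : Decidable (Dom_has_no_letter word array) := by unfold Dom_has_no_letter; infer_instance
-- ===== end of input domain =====

-- B replaces A's nested loops with a single set-intersection emptiness test (simpler).

-- ===== PORT A =====
-- outer loop 'for i in word' with early 'return False' when the inner scan over array hits i
def hnlOuter (array : List String) : List Char → Bool
  | [] => true
  | i :: rest =>
    if array.any (fun j => String.ofList [i] == j) then false else hnlOuter array rest

def has_no_letter (word : String) (array : List String) : Bool :=
  hnlOuter array word.toList

-- ===== PORT B =====
def has_no_letter_alt (word : String) (array : List String) : Bool :=
  (PySem.Set.inter (PySem.Set.ofList (word.toList.map (fun c => String.ofList [c])))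
    (PySem.Set.ofList array)).isEmpty

-- ===== PRECONDITION & SPEC =====
def Spec_has_no_letter (word : String) (array : List String) (out : Bool) : Prop := out = has_no_letter_alt word array
instance (word : String) (array : List String) (out : Bool) : Decidable (Spec_has_no_letter word array out) := by unfold Spec_has_no_letter; infer_instance

-- ===== CLAIM (what is proved, stated in full; the proofs are below) =====
def Claim_equal_has_no_letter : Prop := ∀ (word : String) (array : List String), Dom_has_no_letter word array → Spec_has_no_letter word array (has_no_letter word array)

-- ===== LEMMAS AND PROOFS =====

theorem hnlOuter_eq_not_any (array : List String) (l : List Char) :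
    hnlOuter array l = !(l.any (fun i => array.any (fun j => String.ofList [i] == j))) := by
  induction l with
  | nil => rfl
  | cons i rest ih =>
    simp only [hnlOuter, List.any_cons]
    by_cases h : array.any (fun j => String.ofList [i] == j) = true
    · simp [h]
    · simp [h, ih]

theorem has_no_letter_eq_alt (word : String) (array : List String) :
    has_no_letter word array = has_no_letter_alt word array := by
  rw [has_no_letter, hnlOuter_eq_not_any, has_no_letter_alt, Bool.eq_iff_iff]
  simp only [List.isEmpty_iff, Bool.not_eq_eq_eq_not, Bool.not_true, List.any_eq_false,
    List.eq_nil_iff_forall_not_mem, PySem.Set.mem_inter, PySem.Set.mem_ofList, List.mem_map]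
  constructor
  · rintro h x ⟨⟨c, hc, rfl⟩, hx⟩
    have := h c hc
    simp only [List.any_eq_true, beq_iff_eq, not_exists, not_and] at this
    exact this _ hx rfl
  · intro h i hi
    simp only [List.any_eq_true, beq_iff_eq, not_exists, not_and]
    intro j hj hij
    exact h j ⟨⟨i, hi, hij⟩, hj⟩

-- ===== VERDICT (by name: the statement is the Claim_ definition above) =====
theorem has_no_letter_spec : Claim_equal_has_no_letter := by
  intro word array _
  exact has_no_letter_eq_alt word array
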